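-- pv_equiv track=rewrite | github.com/p0ss/HatCatDev | src/map/training/calibration/finetune.py | find_graph_distant_concepts
-- ===== SOURCE A (Python) =====
-- from typing import Dict, List, Optional, Set, Tuple
--
-- def get_ancestors(concept: str, hierarchy: Dict[str, str], max_depth: int = 10) -> Set[str]:
--     """Get all ancestors of a concept up to max_depth."""
--     ancestors = set()
--     current = concept
--     for _ in range(max_depth):
--         parent = hierarchy.get(current)
--         if not parent or parent == current:
--             break
--         ancestors.add(parent)
--         current = parent
--     return ancestors
--
-- def find_graph_distant_concepts(
--     target_concept: str,
--     all_concepts: List[str],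
--     hierarchy: Dict[str, str],
--     n_distant: int = 5,
--     min_distance: int = 3,
-- ) -> List[str]:
--     """
--     Find concepts that are graph-distant from the target.
--
--     Graph distance = no shared ancestors within min_distance levels.
--     """
--     target_ancestors = get_ancestors(target_concept, hierarchy, max_depth=min_distance)
--     target_ancestors.add(target_concept)
--
--     distant = []
--     for concept in all_concepts:
--         if concept == target_concept:
--             continue
--         concept_ancestors = get_ancestors(concept, hierarchy, max_depth=min_distance)
--         concept_ancestors.add(concept)
--
--         # Check if any overlap in ancestry
--         if not target_ancestors.intersection(concept_ancestors):
--             distant.append(concept)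
--             if len(distant) >= n_distant:
--                 break
--
--     return distant
-- ===== SOURCE B (Python) =====
-- def find_graph_distant_concepts(
--     target_concept,
--     all_concepts,
--     hierarchy,
--     n_distant=5,
--     min_distance=3,
-- ):
--     # Walk up from the target to get its chain (target + ancestors within min_distance).
--     chain = [target_concept]
--     cur = target_concept
--     for _ in range(min_distance):
--         parent = hierarchy.get(cur)
--         if not parent or parent == cur:
--             break
--         chain.append(parent)
--         cur = parent
--
--     # Invert the hierarchy once: parent -> list of children over the valid edges.
--     edges = [(p, c) for c, p in hierarchy.items() if p and p != c]
--     children = {}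
--     for p, c in edges:
--         children.setdefault(p, []).append(c)
--
--     # BFS downward from every chain node for min_distance levels: 'near' collects every
--     # concept whose upward walk meets the chain within min_distance steps.
--     near = set(chain)
--     frontier = list(chain)
--     for _ in range(min_distance):
--         if not frontier:
--             break
--         nxt = []
--         for node in frontier:
--             for ch in children.get(node, []):
--                 if ch not in near:
--                     near.add(ch)
--                     nxt.append(ch)
--         frontier = nxt
--
--     distant = []
--     for concept in all_concepts:
--         if concept != target_concept and concept not in near:
--             distant.append(concept)
--             if len(distant) >= n_distant:
--                 break
--     return distant
-- ===== Notes on version B (the rewrite author's own statement) =====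
-- stated objective: faster
-- what changed: B inverts the hierarchy into a parent->children index and runs one downward BFS of min_distance levels from the target's ancestor chain to materialise the set of all 'near' concepts, then filters all_concepts by a single membership test each, instead of A's per-candidate upward ancestor-set construction and set intersection.
import Mathlib
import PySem

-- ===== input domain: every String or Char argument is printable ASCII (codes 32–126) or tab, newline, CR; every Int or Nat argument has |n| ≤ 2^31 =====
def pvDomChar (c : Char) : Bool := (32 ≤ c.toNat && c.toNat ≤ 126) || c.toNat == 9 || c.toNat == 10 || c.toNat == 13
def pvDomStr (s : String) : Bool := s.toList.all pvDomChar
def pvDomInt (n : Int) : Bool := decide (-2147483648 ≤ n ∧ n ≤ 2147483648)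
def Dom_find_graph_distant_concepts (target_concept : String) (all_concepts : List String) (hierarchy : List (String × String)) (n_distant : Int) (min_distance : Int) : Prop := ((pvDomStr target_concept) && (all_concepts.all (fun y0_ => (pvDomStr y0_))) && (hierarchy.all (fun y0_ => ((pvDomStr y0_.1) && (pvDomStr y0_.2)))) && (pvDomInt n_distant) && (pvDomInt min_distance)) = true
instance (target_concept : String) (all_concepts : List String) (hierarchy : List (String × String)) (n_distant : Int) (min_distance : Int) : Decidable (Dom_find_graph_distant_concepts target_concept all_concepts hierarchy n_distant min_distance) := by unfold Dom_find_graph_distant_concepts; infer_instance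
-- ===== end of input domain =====

-- B replaces A's per-candidate upward ancestor-set build + intersection by inverting the
-- hierarchy once (parent → children) and running one downward BFS of min_distance levels from
-- the target's ancestor chain, then filtering all_concepts by membership (objective: faster; measured).

-- ===== PORT A =====
-- get_ancestors: the for-loop over range(max_depth) with break, accumulating a set
def pvGaLoop (hierarchy : PySem.Dict String String) : Nat → String → PySem.Set String → PySem.Set String
  | 0, _, ancestors => ancestors
  | n + 1, current, ancestors =>
    match hierarchy.get? current with
    | none => ancestors                                     -- parent is None → break
    | some parent =>
      if parent = "" ∨ parent = current then ancestors      -- "not parent or parent == current" → break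
      else pvGaLoop hierarchy n parent (PySem.Set.add ancestors parent)

def get_ancestors (concept : String) (hierarchy : PySem.Dict String String) (max_depth : Int) : PySem.Set String :=
  pvGaLoop hierarchy max_depth.toNat concept PySem.Set.empty

-- the main for-loop over all_concepts, with continue and the n_distant break
def pvALoop (target_concept : String) (hierarchy : PySem.Dict String String)
    (target_ancestors : PySem.Set String) (n_distant min_distance : Int) :
    List String → List String → List String
  | distant, [] => distant
  | distant, concept :: rest =>
    if concept = target_concept then
      pvALoop target_concept hierarchy target_ancestors n_distant min_distance distant rest
    else
      let concept_ancestors := PySem.Set.add (get_ancestors concept hierarchy min_distance) concept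
      if PySem.Set.inter target_ancestors concept_ancestors = [] then
        let distant' := distant ++ [concept]
        if n_distant ≤ (distant'.length : Int) then distant'
        else pvALoop target_concept hierarchy target_ancestors n_distant min_distance distant' rest
      else pvALoop target_concept hierarchy target_ancestors n_distant min_distance distant rest

def find_graph_distant_concepts (target_concept : String) (all_concepts : List String) (hierarchy : List (String × String)) (n_distant : Int) (min_distance : Int) : List String :=
  let h := PySem.Dict.ofList hierarchy
  let target_ancestors := PySem.Set.add (get_ancestors target_concept h min_distance) target_concept
  pvALoop target_concept h target_ancestors n_distant min_distance [] all_concepts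

-- ===== PORT B =====
-- the chain-building loop of Source B (list, starting [target_concept], appending parents)
def pvChainLoop (hierarchy : PySem.Dict String String) : Nat → String → List String → List String
  | 0, _, chain => chain
  | n + 1, cur, chain =>
    match hierarchy.get? cur with
    | none => chain
    | some parent =>
      if parent = "" ∨ parent = cur then chain
      else pvChainLoop hierarchy n parent (chain ++ [parent])

-- edges = [(p, c) for c, p in hierarchy.items() if p and p != c]
def pvEdges (h : PySem.Dict String String) : List (String × String) :=
  (h.items.filter (fun q => q.2 ≠ "" ∧ q.2 ≠ q.1)).map (fun q => (q.2, q.1))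

-- children: for p, c in edges: children.setdefault(p, []).append(c)
def pvChildren (h : PySem.Dict String String) : PySem.Dict String (List String) :=
  (pvEdges h).foldl (fun d e => d.modify e.1 [] (· ++ [e.2])) PySem.Dict.empty

-- inner if of the BFS: if ch not in near: near.add(ch); nxt.append(ch)
def pvStep (acc : PySem.Set String × List String) (ch : String) : PySem.Set String × List String :=
  if PySem.Set.contains acc.1 ch then acc else (PySem.Set.add acc.1 ch, acc.2 ++ [ch])

-- one frontier node: for ch in children.get(node, []): …
def pvNode (children : PySem.Dict String (List String))
    (acc : PySem.Set String × List String) (node : String) : PySem.Set String × List String :=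
  (children.getD node []).foldl pvStep acc

-- for _ in range(min_distance): one level of BFS
def pvBfs (children : PySem.Dict String (List String)) :
    Nat → PySem.Set String → List String → PySem.Set String
  | 0, near, _ => near
  | k + 1, near, frontier =>
    if frontier = [] then near          -- "if not frontier: break"
    else
      let r := frontier.foldl (pvNode children) (near, [])
      pvBfs children k r.1 r.2

-- final filter loop with the n_distant break
def pvBLoop (target_concept : String) (near : PySem.Set String) (n_distant : Int) :
    List String → List String → List String
  | distant, [] => distant
  | distant, concept :: rest =>
    if concept ≠ target_concept ∧ ¬ (PySem.Set.contains near concept = true) then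
      let distant' := distant ++ [concept]
      if n_distant ≤ (distant'.length : Int) then distant'
      else pvBLoop target_concept near n_distant distant' rest
    else pvBLoop target_concept near n_distant distant rest

def find_graph_distant_concepts_alt (target_concept : String) (all_concepts : List String) (hierarchy : List (String × String)) (n_distant : Int) (min_distance : Int) : List String :=
  let h := PySem.Dict.ofList hierarchy
  let chain := pvChainLoop h min_distance.toNat target_concept [target_concept]
  let children := pvChildren h
  let near := pvBfs children min_distance.toNat (PySem.Set.ofList chain) chain
  pvBLoop target_concept near n_distant [] all_concepts

-- ===== PRECONDITION & SPEC =====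
def Spec_find_graph_distant_concepts (target_concept : String) (all_concepts : List String) (hierarchy : List (String × String)) (n_distant : Int) (min_distance : Int) (out : List String) : Prop := out = find_graph_distant_concepts_alt target_concept all_concepts hierarchy n_distant min_distance
instance (target_concept : String) (all_concepts : List String) (hierarchy : List (String × String)) (n_distant : Int) (min_distance : Int) (out : List String) : Decidable (Spec_find_graph_distant_concepts target_concept all_concepts hierarchy n_distant min_distance out) := by unfold Spec_find_graph_distant_concepts; infer_instance

-- ===== CLAIM (what is proved, stated in full; the proofs are below) =====
def Claim_equal_find_graph_distant_concepts : Prop := ∀ (target_concept : String) (all_concepts : List String) (hierarchy : List (String × String)) (n_distant : Int) (min_distance : Int), Dom_find_graph_distant_concepts target_concept all_concepts hierarchy n_distant min_distance → Spec_find_graph_distant_concepts target_concept all_concepts hierarchy n_distant min_distance (find_graph_distant_concepts target_concept all_concepts hierarchy n_distant min_distance)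

-- ===== LEMMAS AND PROOFS =====

-- Hit h TS n c: the upward walk from c (c itself, then ≤ n valid parent steps) meets TS
def Hit (h : PySem.Dict String String) (TS : List String) : Nat → String → Prop
  | 0, c => c ∈ TS
  | n + 1, c => c ∈ TS ∨ ∃ p, h.get? c = some p ∧ ¬(p = "" ∨ p = c) ∧ Hit h TS n p

theorem hit_congr (h : PySem.Dict String String) (TS TS' : List String)
    (hm : ∀ x, x ∈ TS ↔ x ∈ TS') :
    ∀ (n : Nat) (c : String), Hit h TS n c ↔ Hit h TS' n c := by
  intro n
  induction n with
  | zero => intro c; exact hm c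
  | succ n ih =>
    intro c
    simp only [Hit, hm c]
    constructor
    · rintro (hc | ⟨p, hp, hv, hx⟩)
      exacts [Or.inl hc, Or.inr ⟨p, hp, hv, (ih p).mp hx⟩]
    · rintro (hc | ⟨p, hp, hv, hx⟩)
      exacts [Or.inl hc, Or.inr ⟨p, hp, hv, (ih p).mpr hx⟩]

theorem hit_mono (h : PySem.Dict String String) (TS : List String) :
    ∀ (n : Nat) (c : String), Hit h TS n c → Hit h TS (n + 1) c := by
  intro n
  induction n with
  | zero => intro c hc; exact Or.inl hc
  | succ n ih =>
    rintro c (hc | ⟨p, hp, hv, hh⟩)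
    · exact Or.inl hc
    · exact Or.inr ⟨p, hp, hv, ih p hh⟩

-- membership in pvGaLoop splits off the initial accumulator
theorem mem_pvGaLoop_acc (h : PySem.Dict String String) :
    ∀ (n : Nat) (cur : String) (s : PySem.Set String) (x : String),
      x ∈ pvGaLoop h n cur s ↔ x ∈ s ∨ x ∈ pvGaLoop h n cur PySem.Set.empty := by
  intro n
  induction n with
  | zero => intro cur s x; simp [pvGaLoop, PySem.Set.empty]
  | succ n ih =>
    intro cur s x
    simp only [pvGaLoop]
    cases hp : h.get? cur with
    | none => simp [PySem.Set.empty]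
    | some parent =>
      by_cases hb : parent = "" ∨ parent = cur
      · simp [hb, PySem.Set.empty]
      · simp only [if_neg hb]
        rw [ih parent (PySem.Set.add s parent) x, ih parent (PySem.Set.add PySem.Set.empty parent) x]
        simp [PySem.Set.mem_add, PySem.Set.empty]
        tauto

-- Hit holds at any depth for a member of TS
theorem hit_of_mem (h : PySem.Dict String String) (TS : List String) (n : Nat) (c : String)
    (hc : c ∈ TS) : Hit h TS n c := by
  cases n with
  | zero => exact hc
  | succ n => exact Or.inl hc

-- A's per-concept test phrased through Hit
theorem gaLoop_hit (h : PySem.Dict String String) (TS : List String) :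
    ∀ (n : Nat) (c : String),
      (c ∈ TS ∨ ∃ x ∈ pvGaLoop h n c PySem.Set.empty, x ∈ TS) ↔ Hit h TS n c := by
  intro n
  induction n with
  | zero => intro c; simp [pvGaLoop, PySem.Set.empty, Hit]
  | succ n ih =>
    intro c
    simp only [pvGaLoop, Hit]
    cases hp : h.get? c with
    | none => simp [PySem.Set.empty]
    | some parent =>
      by_cases hb : parent = "" ∨ parent = c
      · simp only [if_pos hb]
        simp only [PySem.Set.empty, List.not_mem_nil, false_and, exists_false, or_false,
          Option.some.injEq]
        constructor
        · exact Or.inl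
        · rintro (hc | ⟨p, rfl, hv, _⟩)
          · exact hc
          · exact absurd hb hv
      · simp only [if_neg hb]
        have hsplit : ∀ x, x ∈ pvGaLoop h n parent (PySem.Set.add PySem.Set.empty parent) ↔
            x = parent ∨ x ∈ pvGaLoop h n parent PySem.Set.empty := by
          intro x
          rw [mem_pvGaLoop_acc]
          simp [PySem.Set.empty]
        constructor
        · rintro (hc | ⟨x, hx, hxT⟩)
          · exact Or.inl hc
          · rcases (hsplit x).mp hx with hxp | hx'
            · exact Or.inr ⟨parent, rfl, hb, (ih parent).mp (Or.inl (hxp ▸ hxT))⟩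
            · exact Or.inr ⟨parent, rfl, hb, (ih parent).mp (Or.inr ⟨x, hx', hxT⟩)⟩
        · rintro (hc | ⟨p, hp', hv, hhp⟩)
          · exact Or.inl hc
          · obtain rfl : parent = p := Option.some.inj hp'
            rcases (ih parent).mpr hhp with hpT | ⟨x, hx, hxT⟩
            · exact Or.inr ⟨parent, (hsplit parent).mpr (Or.inl rfl), hpT⟩
            · exact Or.inr ⟨x, (hsplit x).mpr (Or.inr hx), hxT⟩

-- A's intersection-emptiness test is ¬ Hit
theorem inter_empty_iff_not_hit (h : PySem.Dict String String) (TS : PySem.Set String)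
    (md : Int) (c : String) :
    (PySem.Set.inter TS (PySem.Set.add (get_ancestors c h md) c) = []) ↔
      ¬ Hit h TS md.toNat c := by
  rw [List.eq_nil_iff_forall_not_mem, ← gaLoop_hit h TS md.toNat c]
  unfold get_ancestors
  constructor
  · rintro hall (hc | ⟨x, hx, hxT⟩)
    · exact hall c (by rw [PySem.Set.mem_inter, PySem.Set.mem_add]; exact ⟨hc, Or.inr rfl⟩)
    · exact hall x (by rw [PySem.Set.mem_inter, PySem.Set.mem_add]; exact ⟨hxT, Or.inl hx⟩)
  · intro hno x hx
    rw [PySem.Set.mem_inter, PySem.Set.mem_add] at hx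
    rcases hx with ⟨hxT, hm | rfl⟩
    · exact hno (Or.inr ⟨x, hm, hxT⟩)
    · exact hno (Or.inl hxT)

-- B's chain list has the same members as A's target set
theorem mem_pvChainLoop_acc (h : PySem.Dict String String) :
    ∀ (n : Nat) (cur : String) (acc : List String) (x : String),
      x ∈ pvChainLoop h n cur acc ↔ x ∈ acc ∨ x ∈ pvGaLoop h n cur PySem.Set.empty := by
  intro n
  induction n with
  | zero => intro cur acc x; simp [pvChainLoop, pvGaLoop, PySem.Set.empty]
  | succ n ih =>
    intro cur acc x
    simp only [pvChainLoop, pvGaLoop]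
    cases hp : h.get? cur with
    | none => simp [PySem.Set.empty]
    | some parent =>
      by_cases hb : parent = "" ∨ parent = cur
      · simp [hb, PySem.Set.empty]
      · simp only [if_neg hb]
        rw [ih parent (acc ++ [parent]) x,
          mem_pvGaLoop_acc h n parent (PySem.Set.add PySem.Set.empty parent) x]
        simp only [List.mem_append, List.mem_singleton, PySem.Set.mem_add, PySem.Set.empty,
          List.not_mem_nil, false_or]
        tauto

-- edge-list membership: (p, x) is an edge iff the hierarchy maps x to p over a valid step
theorem mem_pvEdges (h : PySem.Dict String String) (p x : String) :
    (p, x) ∈ pvEdges h ↔ (x, p) ∈ h.items ∧ p ≠ "" ∧ p ≠ x := by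
  unfold pvEdges
  rw [List.mem_map]
  constructor
  · rintro ⟨r, hr, hre⟩
    rw [List.mem_filter] at hr
    obtain ⟨hritems, hrval⟩ := hr
    have h1 : r.2 = p := congrArg Prod.fst hre
    have h2 : r.1 = x := congrArg Prod.snd hre
    simp only [decide_eq_true_eq] at hrval
    refine ⟨?_, h1 ▸ hrval.1, ?_⟩
    · have : r = (x, p) := Prod.ext h2 h1
      exact this ▸ hritems
    · rw [← h1, ← h2]; exact hrval.2
  · rintro ⟨hm, h1, h2⟩
    refine ⟨(x, p), List.mem_filter.mpr ⟨hm, ?_⟩, rfl⟩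
    simp only [decide_eq_true_eq]
    exact ⟨h1, h2⟩

-- children index correctness: x is in children[p] iff the hierarchy has the valid edge x → p
theorem mem_children (hier : List (String × String)) (p x : String) :
    x ∈ (pvChildren (PySem.Dict.ofList hier)).getD p [] ↔
      (PySem.Dict.ofList hier).get? x = some p ∧ ¬(p = "" ∨ p = x) := by
  unfold pvChildren
  rw [PySem.Dict.getD_foldl_modify_append]
  rw [PySem.Dict.getD_empty, List.nil_append]
  constructor
  · intro hx
    rw [List.mem_map] at hx
    obtain ⟨e, he, hex⟩ := hx
    rw [List.mem_filter] at he
    obtain ⟨hemem, hep⟩ := he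
    have hep' : e.1 = p := by simpa using hep
    have he2 : e = (p, x) := Prod.ext hep' hex
    rw [he2] at hemem
    obtain ⟨hitems, h1, h2⟩ := (mem_pvEdges _ p x).mp hemem
    refine ⟨?_, ?_⟩
    · exact PySem.Dict.get?_of_mem_items _ hitems (PySem.Dict.nodup_keys_ofList hier)
    · rintro (hh | hh)
      exacts [h1 hh, h2 hh]
  · rintro ⟨hget, hval⟩
    rw [List.mem_map]
    refine ⟨(p, x), ?_, rfl⟩
    rw [List.mem_filter]
    refine ⟨(mem_pvEdges _ p x).mpr
      ⟨PySem.Dict.mem_items_of_get?_eq_some _ hget,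
        fun hh => hval (Or.inl hh), fun hh => hval (Or.inr hh)⟩, by simp⟩

-- the inner fold of one BFS level, membership-wise
theorem foldStep_members (cands : List String) :
    ∀ (near : PySem.Set String) (nxt : List String),
      (∀ x, x ∈ (cands.foldl pvStep (near, nxt)).1 ↔ x ∈ near ∨ x ∈ cands) ∧
      (∀ x, x ∈ (cands.foldl pvStep (near, nxt)).2 ↔ x ∈ nxt ∨ (x ∈ cands ∧ x ∉ near)) := by
  induction cands with
  | nil => intro near nxt; simp
  | cons c rest ih =>
    intro near nxt
    simp only [List.foldl_cons, pvStep]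
    by_cases hc : c ∈ near
    · rw [if_pos ((PySem.Set.contains_iff near c).mpr hc)]
      obtain ⟨h1, h2⟩ := ih near nxt
      constructor
      · intro x; rw [h1 x]; simp only [List.mem_cons]
        constructor
        · rintro (h | h); exacts [Or.inl h, Or.inr (Or.inr h)]
        · rintro (h | rfl | h); exacts [Or.inl h, Or.inl hc, Or.inr h]
      · intro x; rw [h2 x]; simp only [List.mem_cons]
        constructor
        · rintro (h | h); exacts [Or.inl h, Or.inr ⟨Or.inr h.1, h.2⟩]
        · rintro (h | ⟨rfl | hr, hn⟩)
          exacts [Or.inl h, absurd hc hn, Or.inr ⟨hr, hn⟩]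
    · rw [if_neg (fun hh => hc ((PySem.Set.contains_iff near c).mp hh))]
      obtain ⟨h1, h2⟩ := ih (PySem.Set.add near c) (nxt ++ [c])
      constructor
      · intro x; rw [h1 x]
        simp only [PySem.Set.mem_add, List.mem_cons]
        tauto
      · intro x; rw [h2 x]
        simp only [PySem.Set.mem_add, List.mem_append, List.mem_cons]
        by_cases hx : x = c
        · subst hx; tauto
        · tauto

-- folding pvNode over a frontier is folding pvStep over the concatenated children lists
theorem foldNode_eq_foldStep (children : PySem.Dict String (List String)) :
    ∀ (frontier : List String) (acc : PySem.Set String × List String),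
      frontier.foldl (pvNode children) acc =
        (frontier.flatMap (fun node => children.getD node [])).foldl pvStep acc := by
  intro frontier
  induction frontier with
  | nil => intro acc; rfl
  | cons f rest ih =>
    intro acc
    simp only [List.foldl_cons, List.flatMap_cons, List.foldl_append, pvNode, ih]

-- one BFS level advances Hit by one step
theorem hit_succ_iff (hier : List (String × String)) (TS : List String) (m : Nat) (x : String)
    (frontier : List String)
    (hf : ∀ y, y ∈ frontier ↔ (Hit (PySem.Dict.ofList hier) TS m y ∧
      (∀ j, j + 1 = m → ¬ Hit (PySem.Dict.ofList hier) TS j y))) :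
    Hit (PySem.Dict.ofList hier) TS (m + 1) x ↔
      Hit (PySem.Dict.ofList hier) TS m x ∨
        x ∈ frontier.flatMap (fun node => (pvChildren (PySem.Dict.ofList hier)).getD node []) := by
  constructor
  · intro hx
    by_cases hm : Hit (PySem.Dict.ofList hier) TS m x
    · exact Or.inl hm
    · right
      rcases hx with hc | ⟨p, hp, hv, hhp⟩
      · exact absurd (hit_of_mem _ TS m x hc) hm
      · rw [List.mem_flatMap]
        refine ⟨p, ?_, (mem_children hier p x).mpr ⟨hp, hv⟩⟩
        rw [hf p]
        refine ⟨hhp, ?_⟩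
        intro j hj hjp
        apply hm
        subst hj
        exact Or.inr ⟨p, hp, hv, hjp⟩
  · rintro (hx | hx)
    · exact hit_mono _ TS m x hx
    · rw [List.mem_flatMap] at hx
      obtain ⟨p, hpf, hxc⟩ := hx
      rw [hf p] at hpf
      obtain ⟨hget, hval⟩ := (mem_children hier p x).mp hxc
      exact Or.inr ⟨p, hget, hval, hpf.1⟩

-- BFS correctness: after k levels, 'near' holds exactly the concepts Hit within m + k steps
theorem bfs_members (hier : List (String × String)) (TS : List String) :
    ∀ (k m : Nat) (near : PySem.Set String) (frontier : List String),
      (∀ x, x ∈ near ↔ Hit (PySem.Dict.ofList hier) TS m x) →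
      (∀ y, y ∈ frontier ↔ (Hit (PySem.Dict.ofList hier) TS m y ∧
        (∀ j, j + 1 = m → ¬ Hit (PySem.Dict.ofList hier) TS j y))) →
      ∀ x, x ∈ pvBfs (pvChildren (PySem.Dict.ofList hier)) k near frontier ↔
        Hit (PySem.Dict.ofList hier) TS (m + k) x := by
  intro k
  induction k with
  | zero => intro m near frontier hn _ x; simpa using hn x
  | succ k ih =>
    intro m near frontier hn hf x
    simp only [pvBfs]
    by_cases hfe : frontier = []
    · subst hfe
      rw [if_pos rfl, hn x]
      -- the frontier is empty: nothing is newly reachable, Hit has reached its plateau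
      have hstep1 : ∀ z, Hit (PySem.Dict.ofList hier) TS (m + 1) z ↔
          Hit (PySem.Dict.ofList hier) TS m z := by
        intro z
        rw [hit_succ_iff hier TS m z [] hf]
        simp
      have hplateau : ∀ (jj : Nat) (z : String),
          Hit (PySem.Dict.ofList hier) TS (m + jj) z ↔ Hit (PySem.Dict.ofList hier) TS m z := by
        intro jj
        induction jj with
        | zero => intro z; rfl
        | succ jj ihj =>
          intro z
          show Hit (PySem.Dict.ofList hier) TS ((m + jj) + 1) z ↔ _
          constructor
          · rintro (hz | ⟨p, hp, hv, hhp⟩)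
            · exact hit_of_mem _ TS m z hz
            · exact (hstep1 z).mp (Or.inr ⟨p, hp, hv, (ihj p).mp hhp⟩)
          · intro hz
            rcases (hstep1 z).mpr hz with hz' | ⟨p, hp, hv, hhp⟩
            · exact Or.inl hz'
            · exact Or.inr ⟨p, hp, hv, (ihj p).mpr hhp⟩
      exact (hplateau (k + 1) x).symm
    rw [if_neg hfe]
    rw [foldNode_eq_foldStep]
    set cands := frontier.flatMap (fun node => (pvChildren (PySem.Dict.ofList hier)).getD node [])
      with hcands
    obtain ⟨h1, h2⟩ := foldStep_members cands near []
    have hnear' : ∀ y, y ∈ (cands.foldl pvStep (near, [])).1 ↔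
        Hit (PySem.Dict.ofList hier) TS (m + 1) y := by
      intro y
      rw [h1 y, hit_succ_iff hier TS m y frontier hf, hn y]
    have hfront' : ∀ y, y ∈ (cands.foldl pvStep (near, [])).2 ↔
        (Hit (PySem.Dict.ofList hier) TS (m + 1) y ∧
          (∀ j, j + 1 = m + 1 → ¬ Hit (PySem.Dict.ofList hier) TS j y)) := by
      intro y
      rw [h2 y]
      simp only [List.not_mem_nil, false_or]
      rw [hn y]
      constructor
      · rintro ⟨hc, hnm⟩
        refine ⟨(hit_succ_iff hier TS m y frontier hf).mpr (Or.inr hc), ?_⟩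
        intro j hj
        obtain rfl : j = m := by omega
        exact hnm
      · rintro ⟨hy, hnew⟩
        have hnm : ¬ Hit (PySem.Dict.ofList hier) TS m y := hnew m rfl
        rcases (hit_succ_iff hier TS m y frontier hf).mp hy with hm' | hc
        · exact absurd hm' hnm
        · exact ⟨hc, hnm⟩
    have hfin := ih (m + 1) _ _ hnear' hfront' x
    have hk : m + 1 + k = m + (k + 1) := by omega
    rw [hk] at hfin
    exact hfin

-- the two outer loops agree given the tests agree
theorem loops_agree (tgt : String) (h : PySem.Dict String String)
    (TA : PySem.Set String) (near : PySem.Set String) (nd md : Int)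
    (htest : ∀ c, (PySem.Set.inter TA (PySem.Set.add (get_ancestors c h md) c) = []) ↔
      ¬ (PySem.Set.contains near c = true)) :
    ∀ (xs acc : List String),
      pvALoop tgt h TA nd md acc xs = pvBLoop tgt near nd acc xs := by
  intro xs
  induction xs with
  | nil => intro acc; rfl
  | cons c rest ih =>
    intro acc
    simp only [pvALoop, pvBLoop]
    by_cases he : c = tgt
    · simp [he, ih]
    · rw [if_neg he]
      by_cases ha : PySem.Set.inter TA (PySem.Set.add (get_ancestors c h md) c) = []
      · have hcond : c ≠ tgt ∧ ¬ (PySem.Set.contains near c = true) := ⟨he, (htest c).mp ha⟩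
        rw [if_pos ha, if_pos hcond]
        by_cases hn : nd ≤ ((acc ++ [c]).length : Int)
        · rw [if_pos hn, if_pos hn]
        · rw [if_neg hn, if_neg hn, ih]
      · have hcond : ¬(c ≠ tgt ∧ ¬ (PySem.Set.contains near c = true)) :=
          fun hb => ha ((htest c).mpr hb.2)
        rw [if_neg ha, if_neg hcond, ih]

-- ===== VERDICT (by name: the statement is the Claim_ definition above) =====
theorem find_graph_distant_concepts_spec : Claim_equal_find_graph_distant_concepts := by
  intro tgt all hier nd md _
  unfold Spec_find_graph_distant_concepts find_graph_distant_concepts find_graph_distant_concepts_alt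
  set h := PySem.Dict.ofList hier with hh
  set chain := pvChainLoop h md.toNat tgt [tgt] with hchain
  have hchain_mem : ∀ x, x ∈ chain ↔
      x ∈ PySem.Set.add (get_ancestors tgt h md) tgt := by
    intro x
    rw [hchain, mem_pvChainLoop_acc]
    unfold get_ancestors
    rw [PySem.Set.mem_add]
    simp only [List.mem_singleton]
    tauto
  have hnear : ∀ x, x ∈ pvBfs (pvChildren h) md.toNat (PySem.Set.ofList chain) chain ↔
      Hit h chain (0 + md.toNat) x := by
    rw [hh]
    apply bfs_members hier chain md.toNat 0
    · intro x; rw [PySem.Set.mem_ofList]; rfl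
    · intro y
      constructor
      · intro hy; exact ⟨hy, by omega⟩
      · rintro ⟨hy, _⟩; exact hy
  apply loops_agree
  intro c
  rw [inter_empty_iff_not_hit h _ md c]
  rw [PySem.Set.contains_iff, hnear c]
  rw [Nat.zero_add]
  rw [hit_congr h chain _ (fun x => (hchain_mem x)) md.toNat c]
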